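-- pv_equiv track=rewrite | github.com/gcbernreuter1s/CS591_Adv_AI | Project_2/final.py | defensive_heuristic_2
-- ===== SOURCE A (Python) =====
-- PLAYER_1 = 1
--
-- PLAYER_2 = 2
--
-- def defensive_heuristic_2(board, player):
--     opponent = PLAYER_2 if player == PLAYER_1 else PLAYER_1
--
--     # Blockade strength calculation
--     blockade_strength = sum(
--         1 for i, row in enumerate(board[:-1]) for j, piece in enumerate(row)
--         if piece == player and board[i+1][j:j+3].count(opponent) > 0
--     )
--
--     # Exposed workers count
--     exposed_workers = sum(
--         1 for i, row in enumerate(board[:-1]) for j, piece in enumerate(row)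
--         if piece == player and board[i+1][j-1:j+2].count(opponent) > 0
--     )
--
--     # Protected rows occupation (first three rows)
--     protected_rows_occupation = sum(
--         sum(1 for cell in row if cell == player) for row in board[:3]
--     )
--
--     # Return the final defensive evaluation
--     return 3 * blockade_strength - 2 * exposed_workers + 1 * protected_rows_occupation
-- ===== SOURCE B (Python) =====
-- PLAYER_1 = 1
--
-- PLAYER_2 = 2
--
-- def defensive_heuristic_2(board, player):
--     opponent = PLAYER_2 if player == PLAYER_1 else PLAYER_1
--     blockade = 0
--     exposed = 0
--     protected = 0
--     last = len(board) - 1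
--     for i, row in enumerate(board):
--         for j, piece in enumerate(row):
--             if piece != player:
--                 continue
--             if i < last:
--                 nxt = board[i + 1]
--                 if opponent in nxt[j:j+3]:
--                     blockade += 1
--                 if opponent in nxt[j-1:j+2]:
--                     exposed += 1
--             if i < 3:
--                 protected += 1
--     return 3 * blockade - 2 * exposed + protected
-- ===== Notes on version B (the rewrite author's own statement) =====
-- stated objective: alternative
-- what changed: A makes three separate generator-expression passes over the board (blockade, exposed, protected); B makes a single fused pass over rows and cells, maintaining three accumulators and testing membership ('opponent in slice') instead of count()>0, skipping non-player cells early.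
import Mathlib
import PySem

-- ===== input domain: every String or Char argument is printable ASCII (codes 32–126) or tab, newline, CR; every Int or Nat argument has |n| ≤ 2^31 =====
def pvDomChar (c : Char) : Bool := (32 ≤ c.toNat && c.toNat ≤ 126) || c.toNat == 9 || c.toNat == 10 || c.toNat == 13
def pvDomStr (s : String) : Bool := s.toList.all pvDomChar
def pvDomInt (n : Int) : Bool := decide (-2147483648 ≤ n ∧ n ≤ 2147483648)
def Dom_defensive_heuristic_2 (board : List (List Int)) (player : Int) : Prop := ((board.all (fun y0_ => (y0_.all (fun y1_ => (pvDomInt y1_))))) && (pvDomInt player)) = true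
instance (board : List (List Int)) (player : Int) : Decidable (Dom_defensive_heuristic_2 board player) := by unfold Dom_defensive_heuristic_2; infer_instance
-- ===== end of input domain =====

-- B replaces A's three separate comprehension passes by one fused loop over (row, cell)
-- with three accumulators and early skip of non-player cells (one traversal instead of three).

-- ===== PORT A =====
def defensive_heuristic_2 (board : List (List Int)) (player : Int) : Int :=
  let opponent : Int := if player == 1 then 2 else 1
  let blockade_strength : Int :=
    (PySem.List.enumerate (PySem.List.slice board none (some (-1)))).foldl
      (fun acc p =>
        (PySem.List.enumerate p.2).foldl
          (fun acc2 q =>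
            if q.2 == player &&
               decide (0 < PySem.List.count
                 (PySem.List.slice ((PySem.List.pyGet? board (p.1 + 1)).getD [])
                   (some q.1) (some (q.1 + 3))) opponent)
            then acc2 + 1 else acc2) acc) 0
  let exposed_workers : Int :=
    (PySem.List.enumerate (PySem.List.slice board none (some (-1)))).foldl
      (fun acc p =>
        (PySem.List.enumerate p.2).foldl
          (fun acc2 q =>
            if q.2 == player &&
               decide (0 < PySem.List.count
                 (PySem.List.slice ((PySem.List.pyGet? board (p.1 + 1)).getD [])
                   (some (q.1 - 1)) (some (q.1 + 2))) opponent)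
            then acc2 + 1 else acc2) acc) 0
  let protected_rows_occupation : Int :=
    (PySem.List.slice board none (some 3)).foldl
      (fun acc row =>
        acc + row.foldl (fun a c => if c == player then a + 1 else a) 0) 0
  3 * blockade_strength - 2 * exposed_workers + 1 * protected_rows_occupation

-- ===== PORT B =====
-- the body of B's inner loop (one cell): update the three accumulators
def altStep (board : List (List Int)) (player opponent last : Int) (i : Int)
    (s : Int × Int × Int) (q : Int × Int) : Int × Int × Int :=
  if q.2 != player then s
  else
    let nxt := (PySem.List.pyGet? board (i + 1)).getD []
    let s1 :=
      if i < last then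
        ((if (PySem.List.slice nxt (some q.1) (some (q.1 + 3))).contains opponent then s.1 + 1 else s.1),
         (if (PySem.List.slice nxt (some (q.1 - 1)) (some (q.1 + 2))).contains opponent then s.2.1 + 1 else s.2.1),
         s.2.2)
      else s
    if i < 3 then (s1.1, s1.2.1, s1.2.2 + 1) else s1

def defensive_heuristic_2_alt (board : List (List Int)) (player : Int) : Int :=
  let opponent : Int := if player == 1 then 2 else 1
  let last : Int := (board.length : Int) - 1
  let res :=
    (PySem.List.enumerate board).foldl
      (fun s p => (PySem.List.enumerate p.2).foldl (altStep board player opponent last p.1) s)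
      (0, 0, 0)
  3 * res.1 - 2 * res.2.1 + res.2.2

-- ===== PRECONDITION & SPEC =====
def Spec_defensive_heuristic_2 (board : List (List Int)) (player : Int) (out : Int) : Prop := out = defensive_heuristic_2_alt board player
instance (board : List (List Int)) (player : Int) (out : Int) : Decidable (Spec_defensive_heuristic_2 board player out) := by unfold Spec_defensive_heuristic_2; infer_instance

-- ===== CLAIM (what is proved, stated in full; the proofs are below) =====
def Claim_equal_defensive_heuristic_2 : Prop := ∀ (board : List (List Int)) (player : Int), Dom_defensive_heuristic_2 board player → Spec_defensive_heuristic_2 board player (defensive_heuristic_2 board player)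

-- ===== LEMMAS AND PROOFS =====

-- the two per-cell predicates shared by both programs (proof-side abbreviations)
def pbPred (board : List (List Int)) (player opponent i : Int) : Int × Int → Bool :=
  fun q => q.2 == player &&
    ((PySem.List.slice ((PySem.List.pyGet? board (i + 1)).getD [])
        (some q.1) (some (q.1 + 3))).contains opponent)

def pePred (board : List (List Int)) (player opponent i : Int) : Int × Int → Bool :=
  fun q => q.2 == player &&
    ((PySem.List.slice ((PySem.List.pyGet? board (i + 1)).getD [])
        (some (q.1 - 1)) (some (q.1 + 2))).contains opponent)

lemma count_pos_eq_contains (xs : List Int) (v : Int) :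
    decide (0 < PySem.List.count xs v) = xs.contains v := by
  simp [PySem.List.count_eq, List.count_pos_iff]

-- evaluating B's inner loop over one row
lemma altStep_fold (board : List (List Int)) (player opponent last i : Int)
    (row : List Int) : ∀ (s b e p : Int),
    (PySem.List.enumerate row s).foldl (altStep board player opponent last i) (b, e, p) =
      (b + (if i < last then ((PySem.List.enumerate row s).countP (pbPred board player opponent i) : Int) else 0),
       e + (if i < last then ((PySem.List.enumerate row s).countP (pePred board player opponent i) : Int) else 0),
       p + (if i < 3 then (row.countP (fun c => c == player) : Int) else 0)) := by
  induction row with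
  | nil => intro s b e p; simp [PySem.List.enumerate_nil]
  | cons x xs ih =>
    intro s b e p
    rw [PySem.List.enumerate_cons]
    simp only [List.foldl_cons, List.countP_cons, altStep, pbPred, pePred]
    by_cases hx : (x == player) = true
    · simp only [hx, bne, Bool.not_true, Bool.true_and] at *
      rw [ih]
      split_ifs <;> simp_all [Prod.ext_iff] <;> omega
    · simp only [bne, hx, Bool.not_false, if_true, Bool.false_and]
      rw [ih]
      simp

-- evaluating B's outer loop
lemma alt_outer_fold (board : List (List Int)) (player opponent last : Int)
    (l : List (Int × List Int)) : ∀ (b e p : Int),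
    l.foldl (fun s p_ => (PySem.List.enumerate p_.2).foldl (altStep board player opponent last p_.1) s) (b, e, p) =
      (b + (l.map (fun p_ => if p_.1 < last then ((PySem.List.enumerate p_.2).countP (pbPred board player opponent p_.1) : Int) else 0)).sum,
       e + (l.map (fun p_ => if p_.1 < last then ((PySem.List.enumerate p_.2).countP (pePred board player opponent p_.1) : Int) else 0)).sum,
       p + (l.map (fun p_ => if p_.1 < 3 then (p_.2.countP (fun c => c == player) : Int) else 0)).sum) := by
  induction l with
  | nil => intro b e p; simp
  | cons hd tl ih =>
    intro b e p
    simp only [List.foldl_cons, List.map_cons, List.sum_cons]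
    rw [altStep_fold, ih]
    refine Prod.ext ?_ (Prod.ext ?_ ?_) <;> simp <;> ring

-- the (i < last) guard over the whole board is the same as summing over board[:-1]
lemma sum_guard_last (board : List (List Int)) (f : Int × List Int → Int) :
    ((PySem.List.enumerate board).map
        (fun p => if p.1 < (board.length : Int) - 1 then f p else 0)).sum =
      ((PySem.List.enumerate board.dropLast).map f).sum := by
  rcases List.eq_nil_or_concat board with rfl | ⟨ys, z, rfl⟩
  · simp [PySem.List.enumerate_nil]
  · simp only [List.concat_eq_append]
    rw [List.dropLast_concat, PySem.List.enumerate_append, List.map_append, List.sum_append]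
    have h1 : ((PySem.List.enumerate ys).map
        (fun p => if p.1 < ((ys ++ [z]).length : Int) - 1 then f p else 0)) =
        ((PySem.List.enumerate ys).map f) := by
      apply List.map_congr_left
      intro p hp
      rw [PySem.List.mem_enumerate_iff] at hp
      obtain ⟨k, hk, rfl⟩ := hp
      rw [if_pos]
      simp only [List.length_append, List.length_cons, List.length_nil]
      push_cast
      omega
    have h2 : ((PySem.List.enumerate [z] ((0:Int) + ys.length)).map
        (fun p => if p.1 < ((ys ++ [z]).length : Int) - 1 then f p else 0)).sum = 0 := by
      rw [PySem.List.enumerate_cons, PySem.List.enumerate_nil]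
      simp only [List.map_cons, List.map_nil, List.sum_cons, List.sum_nil, add_zero]
      rw [if_neg]
      simp only [List.length_append, List.length_cons, List.length_nil]
      push_cast
      omega
    rw [h1, h2, add_zero]

-- the (i < 3) guard is the same as summing over board[:3]
lemma sum_guard_three (board : List (List Int)) (g : List Int → Int) :
    ((PySem.List.enumerate board).map
        (fun p => if p.1 < 3 then g p.2 else 0)).sum =
      ((board.take 3).map g).sum := by
  conv_lhs => rw [← List.take_append_drop 3 board]
  rw [PySem.List.enumerate_append, List.map_append, List.sum_append]
  have h1 : ((PySem.List.enumerate (board.take 3)).map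
      (fun p => if p.1 < 3 then g p.2 else 0)).sum = ((board.take 3).map g).sum := by
    have : ((PySem.List.enumerate (board.take 3)).map
        (fun p => if p.1 < 3 then g p.2 else 0)) = ((PySem.List.enumerate (board.take 3)).map (fun p => g p.2)) := by
      apply List.map_congr_left
      intro p hp
      rw [PySem.List.mem_enumerate_iff] at hp
      obtain ⟨k, hk, rfl⟩ := hp
      have : (board.take 3).length ≤ 3 := by simp
      rw [if_pos]
      simp only [zero_add]
      omega
    rw [this]
    conv_rhs => rw [← PySem.List.map_snd_enumerate (board.take 3) 0, List.map_map]
    rfl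
  have h2 : ((PySem.List.enumerate (board.drop 3) ((0:Int) + (board.take 3).length)).map
      (fun p => if p.1 < 3 then g p.2 else 0)).sum = 0 := by
    have : ((PySem.List.enumerate (board.drop 3) ((0:Int) + (board.take 3).length)).map
        (fun p => if p.1 < 3 then g p.2 else 0)) = ((PySem.List.enumerate (board.drop 3) ((0:Int) + (board.take 3).length)).map (fun _ => (0:Int))) := by
      apply List.map_congr_left
      intro p hp
      rw [PySem.List.mem_enumerate_iff] at hp
      obtain ⟨k, hk, rfl⟩ := hp
      have h3 : (board.drop 3).length = board.length - 3 := by simp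
      have h4 : (board.take 3).length = 3 := by
        simp only [List.length_take]
        omega
      rw [if_neg]
      rw [h4]; push_cast; omega
    rw [this]
    simp
  rw [h1, h2, add_zero]

lemma slice_three (xs : List (List Int)) :
    PySem.List.slice xs none (some 3) = xs.take 3 := by
  simpa using PySem.List.slice_to xs (by norm_num)

lemma main_eq (board : List (List Int)) (player : Int) :
    defensive_heuristic_2 board player = defensive_heuristic_2_alt board player := by
  unfold defensive_heuristic_2 defensive_heuristic_2_alt
  simp only [count_pos_eq_contains, PySem.List.slice_to_neg_one, slice_three,
    PySem.List.foldl_if_add_one, zero_add,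
    PySem.List.foldl_add, alt_outer_fold]
  rw [sum_guard_last board
      (fun p => ((PySem.List.enumerate p.2).countP
        (pbPred board player (if player == 1 then 2 else 1) p.1) : Int)),
    sum_guard_last board
      (fun p => ((PySem.List.enumerate p.2).countP
        (pePred board player (if player == 1 then 2 else 1) p.1) : Int)),
    sum_guard_three board (fun row => (row.countP (fun c => c == player) : Int))]
  unfold pbPred pePred
  simp
  try ring

-- ===== VERDICT (by name: the statement is the Claim_ definition above) =====
theorem defensive_heuristic_2_spec : Claim_equal_defensive_heuristic_2 := by
  intro board player _
  unfold Spec_defensive_heuristic_2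
  exact main_eq board player
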